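-- pv_equiv track=rewrite | github.com/golupankajgoyal/Pythonist | venv/Data Structures/graph Solutions.py | jump_to_zero
-- ===== SOURCE A (Python) =====
-- from collections import defaultdict,deque
--
-- def jump_to_zero(arr,start):
--     graph=defaultdict(list)
--     for i in range(len(arr)):
--         if arr[i]==0:
--             graph[i]=[]
--         else:
--             if i+arr[i]<len(arr):
--                 graph[i].append(i+arr[i])
--             if i-arr[i]>=0:
--                 graph[i].append(i-arr[i])
--     visited=defaultdict(bool)
--     queue=deque()
--     queue.append(start)
--     while queue:
--         vertex=queue.popleft()
--         visited[vertex]=True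
--         if len(graph[vertex])==0:
--             return True
--         else:
--             for child in graph[vertex]:
--                 if  not visited[child]:
--                     queue.append(child)
--     return False
-- ===== SOURCE B (Python) =====
-- def jump_to_zero(arr, start):
--     n = len(arr)
--
--     def succ(v):
--         if 0 <= v < n and arr[v] != 0:
--             out = []
--             if v + arr[v] < n:
--                 out.append(v + arr[v])
--             if v - arr[v] >= 0:
--                 out.append(v - arr[v])
--             return out
--         return []
--
--     reach = {start}
--     for _ in range(2 * n + 1):
--         reach = reach | {c for v in reach for c in succ(v)}
--     return any(not succ(v) for v in reach)
-- ===== Notes on version B (the rewrite author's own statement) =====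
-- stated objective: alternative
-- what changed: A precomputes an adjacency dict and runs an early-exit BFS with a deque and visited flags; B drops the prebuilt graph and the queue entirely, saturating the reachable set by a bounded fixed-point iteration over on-the-fly successors and then scanning it for a vertex with no successors.
import Mathlib
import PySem

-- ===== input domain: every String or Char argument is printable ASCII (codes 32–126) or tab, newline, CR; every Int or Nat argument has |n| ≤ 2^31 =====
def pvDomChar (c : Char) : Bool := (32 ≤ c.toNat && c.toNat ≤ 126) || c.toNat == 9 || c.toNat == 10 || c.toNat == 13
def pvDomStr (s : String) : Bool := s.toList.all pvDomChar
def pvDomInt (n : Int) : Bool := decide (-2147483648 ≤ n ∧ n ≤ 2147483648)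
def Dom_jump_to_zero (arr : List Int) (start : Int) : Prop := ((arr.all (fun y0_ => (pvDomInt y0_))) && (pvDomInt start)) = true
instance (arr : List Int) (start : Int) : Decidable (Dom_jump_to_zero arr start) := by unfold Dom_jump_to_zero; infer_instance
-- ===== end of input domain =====

-- B replaces A's BFS queue with a fixed-point saturation of the reachable set followed by a dead-end scan (alternative algorithm, same result).

-- ===== PORT A =====

-- arr[i] for an index A only ever uses in range (Python never raises here)
def pvAt (arr : List Int) (i : Int) : Int := (PySem.List.pyGet? arr i).getD 0

-- 'graph=defaultdict(list); for i in range(len(arr)): …'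
def pvBuildStep (arr : List Int) (g : PySem.Dict Int (List Int)) (i : Int) :
    PySem.Dict Int (List Int) :=
  if pvAt arr i = 0 then g.insert i []
  else
    let g1 := if i + pvAt arr i < (arr.length : Int)
              then g.insert i ((g.getD i []) ++ [i + pvAt arr i]) else g
    if 0 ≤ i - pvAt arr i
    then g1.insert i ((g1.getD i []) ++ [i - pvAt arr i]) else g1

def pvBuildGraph (arr : List Int) : PySem.Dict Int (List Int) :=
  (PySem.List.pyRange 0 arr.length 1).foldl (pvBuildStep arr) PySem.Dict.empty

-- finite universe every queue element lives in; used only by the termination guard below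
def pvUniv (graph : PySem.Dict Int (List Int)) (n : Int) (start : Int) : List Int :=
  start :: (PySem.List.pyRange 0 n 1).flatMap (fun i => graph.getD i [])

theorem pvFilterLe {α : Type} (l : List α) (p q : α → Bool)
    (hpq : ∀ x, q x = true → p x = true) :
    (l.filter q).length ≤ (l.filter p).length := by
  induction l with
  | nil => simp
  | cons x t ih =>
    by_cases hq : q x = true
    · simp [hq, hpq x hq]; omega
    · simp only [List.filter_cons]
      rw [if_neg (by simp [hq])]
      by_cases hp : p x = true
      · simp [hp]; omega
      · rw [if_neg (by simp [hp])]; exact ih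

theorem pvFilterLt {α : Type} (l : List α) (p q : α → Bool)
    (hpq : ∀ x, q x = true → p x = true)
    (v : α) (hv : v ∈ l) (hp : p v = true) (hq : q v = false) :
    (l.filter q).length < (l.filter p).length := by
  induction l with
  | nil => cases hv
  | cons x t ih =>
    rcases List.mem_cons.mp hv with rfl | hvt
    · simp only [List.filter_cons, hp, if_pos]
      rw [if_neg (by simp [hq])]
      have := pvFilterLe t p q hpq
      simp; omega
    · have h1 := ih hvt
      simp only [List.filter_cons]
      by_cases hqx : q x = true
      · simp [hqx, hpq x hqx]; omega
      · rw [if_neg (by simp [hqx])]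
        by_cases hpx : p x = true
        · simp [hpx]; omega
        · rw [if_neg (by simp [hpx])]; exact h1

-- 'while queue: …' ; visited (defaultdict(bool), used only for membership) is ported as the set of
-- vertices marked True.  The 'v ∈ univ' test is a pure TOTALITY GUARD for well-founded recursion:
-- it is always true on reachable states (every queue element is start or some adjacency-list entry).
def pvLoopA (graph : PySem.Dict Int (List Int)) (univ : List Int)
    (visited : PySem.Set Int) (queue : List Int) : Bool :=
  match queue with
  | [] => false
  | v :: rest =>
    if _hmem : v ∈ univ then
      if (graph.getD v []).length = 0 then true
      else pvLoopA graph univ (PySem.Set.add visited v)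
        (rest ++ (graph.getD v []).filter
          (fun c => !(PySem.Set.contains (PySem.Set.add visited v) c)))
    else false
termination_by ((univ.filter (fun u => !(PySem.Set.contains visited u))).length,
                (queue.filter (fun c => PySem.Set.contains visited c)).length)
decreasing_by
  by_cases hv : v ∈ visited
  · rw [PySem.Set.add_of_mem hv]
    apply Prod.Lex.right
    have hpush : ((graph.getD v []).filter
        (fun c => !(PySem.Set.contains visited c))).filter
        (fun c => PySem.Set.contains visited c) = [] := by
      rw [List.filter_filter]
      apply List.filter_eq_nil_iff.mpr
      intro a _
      by_cases h : PySem.Set.contains visited a = true <;> simp_all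
    rw [List.filter_append, hpush, List.append_nil, List.filter_cons,
        if_pos (by simpa [PySem.Set.contains_iff] using hv)]
    simp
  · apply Prod.Lex.left
    apply pvFilterLt univ
      (p := fun u => !(PySem.Set.contains visited u))
      (q := fun u => !(PySem.Set.contains (PySem.Set.add visited v) u))
    · intro x hx
      simp only [Bool.not_eq_true', PySem.Set.contains_eq_listContains] at hx ⊢
      by_cases h : x ∈ visited
      · exfalso
        have : x ∈ PySem.Set.add visited v := by
          rw [PySem.Set.mem_add]; exact Or.inl h
        simp [this] at hx
      · simp [h]
    · exact _hmem
    · simp [hv]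
    · simp only [PySem.Set.contains_eq_listContains]
      simp [PySem.Set.mem_add]

def jump_to_zero (arr : List Int) (start : Int) : Bool :=
  let graph := pvBuildGraph arr
  pvLoopA graph (pvUniv graph arr.length start) PySem.Set.empty [start]

-- ===== PORT B =====

-- B's inner 'succ(v)': the two jumps computed on the fly
def pvSucc (arr : List Int) (v : Int) : List Int :=
  if 0 ≤ v ∧ v < (arr.length : Int) ∧ pvAt arr v ≠ 0 then
    (if v + pvAt arr v < (arr.length : Int) then [v + pvAt arr v] else []) ++
    (if 0 ≤ v - pvAt arr v then [v - pvAt arr v] else [])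
  else []

-- 'reach = reach | {c for v in reach for c in succ(v)}'
def pvStep (arr : List Int) (r : PySem.Set Int) : PySem.Set Int :=
  PySem.Set.union r (r.flatMap (fun v => pvSucc arr v))

def jump_to_zero_alt (arr : List Int) (start : Int) : Bool :=
  let reach := (List.range (2 * arr.length + 1)).foldl
    (fun r _ => pvStep arr r) (PySem.Set.ofList [start])
  reach.any (fun v => (pvSucc arr v).isEmpty)

-- ===== PRECONDITION & SPEC =====
def Spec_jump_to_zero (arr : List Int) (start : Int) (out : Bool) : Prop := out = jump_to_zero_alt arr start
instance (arr : List Int) (start : Int) (out : Bool) : Decidable (Spec_jump_to_zero arr start out) := by unfold Spec_jump_to_zero; infer_instance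

-- ===== CLAIM (what is proved, stated in full; the proofs are below) =====
def Claim_equal_jump_to_zero : Prop := ∀ (arr : List Int) (start : Int), Dom_jump_to_zero arr start → Spec_jump_to_zero arr start (jump_to_zero arr start)

-- ===== LEMMAS AND PROOFS =====

-- reachability in the implicit jump graph
inductive pvR (arr : List Int) : Int → Int → Prop
  | refl (v : Int) : pvR arr v v
  | step {u v c : Int} : pvR arr u v → c ∈ pvSucc arr v → pvR arr u c

theorem pvR_trans {arr : List Int} {a b c : Int}
    (h1 : pvR arr a b) (h2 : pvR arr b c) : pvR arr a c := by
  induction h2 with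
  | refl => exact h1
  | step _ hmem ih => exact pvR.step ih hmem

theorem pvR_closed {arr : List Int} {S : Int → Prop}
    (hS : ∀ u, S u → ∀ c ∈ pvSucc arr u, S c) {q w : Int}
    (hq : S q) (h : pvR arr q w) : S w := by
  induction h with
  | refl => exact hq
  | step _ hmem ih => exact hS _ ih _ hmem

theorem pvSucc_mem_range {arr : List Int} {v c : Int} (h : c ∈ pvSucc arr v) :
    0 ≤ v ∧ v < (arr.length : Int) := by
  unfold pvSucc at h
  split at h
  · rename_i hc; exact ⟨hc.1, hc.2.1⟩
  · cases h

theorem pvSucc_len {arr : List Int} (v : Int) : (pvSucc arr v).length ≤ 2 := by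
  unfold pvSucc; split_ifs <;> simp_all

-- A's prebuilt adjacency dict agrees with B's on-the-fly successors
theorem pvBuildStep_getD_self (arr : List Int) (g : PySem.Dict Int (List Int)) (i : Int)
    (hg : g.getD i [] = []) (h0 : 0 ≤ i) (h1 : i < (arr.length : Int)) :
    (pvBuildStep arr g i).getD i [] = pvSucc arr i := by
  unfold pvBuildStep pvSucc
  by_cases hz : pvAt arr i = 0
  · simp [hz]
  · have hcond : 0 ≤ i ∧ i < (arr.length : Int) ∧ pvAt arr i ≠ 0 := ⟨h0, h1, hz⟩
    rw [if_neg hz, if_pos hcond]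
    split_ifs with hc1 hc2 hc2 <;> simp [hg]

theorem pvBuildStep_getD_other (arr : List Int) (g : PySem.Dict Int (List Int))
    (i v : Int) (hne : v ≠ i) :
    (pvBuildStep arr g i).getD v [] = g.getD v [] := by
  unfold pvBuildStep
  split_ifs <;> simp [PySem.Dict.getD_insert, hne]

theorem pvBuild_aux (arr : List Int) (n : Nat) (hn : n ≤ arr.length) (v : Int) :
    ((PySem.List.pyRange 0 (n : Int) 1).foldl (pvBuildStep arr) PySem.Dict.empty).getD v []
      = if 0 ≤ v ∧ v < (n : Int) then pvSucc arr v else [] := by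
  induction n with
  | zero =>
    rw [PySem.List.pyRange_one_eq_nil (by omega)]
    rw [if_neg (by omega)]
    simp [PySem.Dict.getD_empty]
  | succ k ih =>
    have hk : k ≤ arr.length := by omega
    have hcast : ((k + 1 : Nat) : Int) = (k : Int) + 1 := by push_cast; ring
    rw [hcast, PySem.List.pyRange_one_succ_right (by positivity), List.foldl_append,
        List.foldl_cons, List.foldl_nil]
    by_cases hv : v = (k : Int)
    · subst hv
      have hlen : (k : Int) < (arr.length : Int) := by
        have : (k : Nat) < arr.length := by omega
        exact_mod_cast this
      rw [pvBuildStep_getD_self arr _ _ (by rw [ih hk, if_neg (by omega)]) (by positivity) hlen]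
      split_ifs with hc
      · rfl
      · exfalso; omega
    · rw [pvBuildStep_getD_other arr _ _ _ hv, ih hk]
      split_ifs with h1 h2 <;> first | rfl | omega
theorem pvGraph_getD (arr : List Int) (v : Int) :
    (pvBuildGraph arr).getD v [] = pvSucc arr v := by
  unfold pvBuildGraph
  rw [pvBuild_aux arr arr.length (le_refl _) v]
  split_ifs with h
  · rfl
  · unfold pvSucc
    rw [if_neg (by tauto)]

theorem pvMem_univ (arr : List Int) (start : Int) {v c : Int}
    (h : c ∈ pvSucc arr v) :
    c ∈ pvUniv (pvBuildGraph arr) arr.length start := by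
  have hr := pvSucc_mem_range h
  unfold pvUniv
  apply List.mem_cons_of_mem
  apply List.mem_flatMap.mpr
  exact ⟨v, PySem.List.mem_pyRange_one.mpr ⟨hr.1, hr.2⟩, by rwa [pvGraph_getD]⟩

-- ----- A-side: what the BFS loop returns -----

theorem pvLoopA_true (arr : List Int) (univ : List Int)
    (visited : PySem.Set Int) (queue : List Int) :
    pvLoopA (pvBuildGraph arr) univ visited queue = true →
    ∃ w, (∃ q ∈ queue, pvR arr q w) ∧ pvSucc arr w = [] := by
  fun_induction pvLoopA (pvBuildGraph arr) univ visited queue with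
  | case1 => simp
  | case2 visited v rest hmem hlen =>
    intro _
    refine ⟨v, ⟨v, List.mem_cons_self, pvR.refl v⟩, ?_⟩
    rw [← pvGraph_getD arr v]
    exact List.eq_nil_of_length_eq_zero hlen
  | case3 visited v rest hmem hlen ih =>
    intro h
    obtain ⟨w, ⟨q, hq, hR⟩, hw⟩ := ih h
    rcases List.mem_append.mp hq with hq | hq
    · exact ⟨w, ⟨q, List.mem_cons_of_mem _ hq, hR⟩, hw⟩
    · have hq' : q ∈ pvSucc arr v := by
        rw [← pvGraph_getD arr v]; exact (List.mem_filter.mp hq).1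
      exact ⟨w, ⟨v, List.mem_cons_self, pvR_trans (pvR.step (pvR.refl v) hq') hR⟩, hw⟩
  | case4 => simp

theorem pvLoopA_false (arr : List Int) (univ : List Int)
    (hU : ∀ v c : Int, c ∈ pvSucc arr v → c ∈ univ)
    (visited : PySem.Set Int) (queue : List Int) :
    (∀ q ∈ queue, q ∈ univ) →
    (∀ u ∈ visited, pvSucc arr u ≠ [] ∧ ∀ c ∈ pvSucc arr u, c ∈ visited ∨ c ∈ queue) →
    pvLoopA (pvBuildGraph arr) univ visited queue = false →
    ∀ q, (q ∈ visited ∨ q ∈ queue) → ∀ w, pvR arr q w → pvSucc arr w ≠ [] := by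
  fun_induction pvLoopA (pvBuildGraph arr) univ visited queue with
  | case1 visited =>
    intro _ hinv _ q hqmem w hR
    rcases hqmem with hq | hq
    · have hw : w ∈ visited := by
        refine pvR_closed (S := (· ∈ visited)) ?_ hq hR
        intro u hu c hc
        rcases (hinv u hu).2 c hc with h | h
        · exact h
        · cases h
      exact (hinv w hw).1
    · cases hq
  | case2 visited v rest hmem hlen =>
    intro _ _ h; cases h
  | case3 visited v rest hmem hlen ih =>
    intro hq hinv h q hqmem w hR
    have hsuccv : pvSucc arr v ≠ [] := by
      rw [← pvGraph_getD arr v]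
      intro hnil; rw [hnil] at hlen; simp at hlen
    have hq' : ∀ x ∈ rest ++ (pvBuildGraph arr |>.getD v []).filter
        (fun c => !(PySem.Set.contains (PySem.Set.add visited v) c)), x ∈ univ := by
      intro x hx
      rcases List.mem_append.mp hx with hx | hx
      · exact hq x (List.mem_cons_of_mem _ hx)
      · refine hU v x ?_
        rw [← pvGraph_getD arr v]; exact (List.mem_filter.mp hx).1
    have hinv' : ∀ u ∈ PySem.Set.add visited v, pvSucc arr u ≠ [] ∧
        ∀ c ∈ pvSucc arr u, c ∈ PySem.Set.add visited v ∨
          c ∈ rest ++ (pvBuildGraph arr |>.getD v []).filter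
            (fun c => !(PySem.Set.contains (PySem.Set.add visited v) c)) := by
      intro u hu
      rcases (PySem.Set.mem_add _ _ _).mp hu with hu | rfl
      · refine ⟨(hinv u hu).1, ?_⟩
        intro c hc
        rcases (hinv u hu).2 c hc with h' | h'
        · exact Or.inl ((PySem.Set.mem_add _ _ _).mpr (Or.inl h'))
        · rcases List.mem_cons.mp h' with rfl | h'
          · exact Or.inl ((PySem.Set.mem_add _ _ _).mpr (Or.inr rfl))
          · exact Or.inr (List.mem_append.mpr (Or.inl h'))
      · refine ⟨hsuccv, ?_⟩
        intro c hc
        by_cases hcv : c ∈ PySem.Set.add visited u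
        · exact Or.inl hcv
        · refine Or.inr (List.mem_append.mpr (Or.inr ?_))
          refine List.mem_filter.mpr ⟨by rw [pvGraph_getD]; exact hc, ?_⟩
          simp only [Bool.not_eq_eq_eq_not, Bool.not_true]
          rw [← Bool.not_eq_true]
          intro hcon
          exact hcv ((PySem.Set.contains_iff _ _).mp hcon)
    have hres := ih hq' hinv' h
    rcases hqmem with hqv | hqq
    · exact hres q (Or.inl ((PySem.Set.mem_add _ _ _).mpr (Or.inl hqv))) w hR
    · rcases List.mem_cons.mp hqq with rfl | hqq
      · exact hres q (Or.inl ((PySem.Set.mem_add _ _ _).mpr (Or.inr rfl))) w hR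
      · exact hres q (Or.inr (List.mem_append.mpr (Or.inl hqq))) w hR
  | case4 visited v rest hmem =>
    intro hq _ _
    exact absurd (hq v List.mem_cons_self) hmem

-- ----- B-side: the saturation computes the reachable set -----

def pvIt (arr : List Int) (start : Int) : Nat → PySem.Set Int
  | 0 => PySem.Set.ofList [start]
  | k + 1 => pvStep arr (pvIt arr start k)

theorem pvIt_eq_fold (arr : List Int) (start : Int) (k : Nat) :
    (List.range k).foldl (fun r _ => pvStep arr r) (PySem.Set.ofList [start])
      = pvIt arr start k := by
  induction k with
  | zero => rfl
  | succ m ih => rw [List.range_succ, List.foldl_append, ih]; rfl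

theorem pvMem_step {arr : List Int} {r : PySem.Set Int} {x : Int} :
    x ∈ pvStep arr r ↔ x ∈ r ∨ ∃ v ∈ r, x ∈ pvSucc arr v := by
  unfold pvStep
  rw [PySem.Set.mem_union, List.mem_flatMap]

theorem pvIt_nodup (arr : List Int) (start : Int) (k : Nat) :
    (pvIt arr start k).Nodup := by
  induction k with
  | zero => exact PySem.Set.nodup_ofList _
  | succ m ih => exact PySem.Set.nodup_union _ _ ih

theorem pvIt_subset_succ (arr : List Int) (start : Int) (k : Nat) :
    ∀ x ∈ pvIt arr start k, x ∈ pvIt arr start (k + 1) := by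
  intro x hx
  exact pvMem_step.mpr (Or.inl hx)

def pvClosed (arr : List Int) (r : PySem.Set Int) : Prop :=
  ∀ v ∈ r, ∀ c ∈ pvSucc arr v, c ∈ r

theorem pvClosed_step {arr : List Int} {start : Int} {k : Nat}
    (h : pvClosed arr (pvIt arr start k)) : pvClosed arr (pvIt arr start (k + 1)) := by
  have hmem : ∀ x, x ∈ pvIt arr start (k + 1) ↔ x ∈ pvIt arr start k := by
    intro x
    constructor
    · intro hx
      rcases pvMem_step.mp hx with hx | ⟨v, hv, hx⟩
      · exact hx
      · exact h v hv x hx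
    · exact pvIt_subset_succ arr start k x
  intro v hv c hc
  exact (hmem c).mpr (h v ((hmem v).mp hv) c hc)

def pvBigU (arr : List Int) (start : Int) : List Int :=
  start :: ((List.range arr.length).map (fun (i : Nat) => (i : Int))).flatMap (fun v => pvSucc arr v)

theorem pvIt_subset_bigU (arr : List Int) (start : Int) (k : Nat) :
    ∀ x ∈ pvIt arr start k, x ∈ pvBigU arr start := by
  induction k with
  | zero =>
    intro x hx
    rcases (PySem.Set.mem_ofList _ _).mp hx with h
    simp at h
    subst h
    exact List.mem_cons_self
  | succ m ih =>
    intro x hx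
    rcases pvMem_step.mp hx with hx | ⟨v, hv, hx⟩
    · exact ih x hx
    · have hr := pvSucc_mem_range hx
      apply List.mem_cons_of_mem
      apply List.mem_flatMap.mpr
      refine ⟨((v.toNat : Nat) : Int), ?_, ?_⟩
      · exact List.mem_map.mpr ⟨v.toNat, List.mem_range.mpr (show v.toNat < arr.length by omega), rfl⟩
      · rwa [Int.toNat_of_nonneg hr.1]

theorem pvFlatMap_succ_len (arr : List Int) (l : List Int) :
    (l.flatMap (fun v => pvSucc arr v)).length ≤ 2 * l.length := by
  induction l with
  | nil => simp
  | cons x t ih =>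
    rw [List.flatMap_cons, List.length_append]
    have := pvSucc_len (arr := arr) x
    simp only [List.length_cons]
    omega

theorem pvBigU_len (arr : List Int) (start : Int) :
    (pvBigU arr start).length ≤ 2 * arr.length + 1 := by
  unfold pvBigU
  rw [List.length_cons]
  have := pvFlatMap_succ_len arr ((List.range arr.length).map (fun (i : Nat) => (i : Int)))
  rw [List.length_map, List.length_range] at this
  omega

theorem pvLen_le_of_subset_nodup {l1 l2 : List Int} (h1 : l1.Nodup)
    (hsub : ∀ x ∈ l1, x ∈ l2) : l1.length ≤ l2.length := by
  calc l1.length = l1.toFinset.card := (List.toFinset_card_of_nodup h1).symm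
    _ ≤ l2.toFinset.card := Finset.card_le_card (fun x hx =>
        List.mem_toFinset.mpr (hsub x (List.mem_toFinset.mp hx)))
    _ ≤ l2.length := l2.toFinset_card_le

theorem pvIt_grow {arr : List Int} {start : Int} {k : Nat}
    (h : ¬ pvClosed arr (pvIt arr start k)) :
    (pvIt arr start k).length + 1 ≤ (pvIt arr start (k + 1)).length := by
  unfold pvClosed at h
  push Not at h
  obtain ⟨v, hv, c, hc, hcnot⟩ := h
  have hsub : pvIt arr start k ⊆ pvIt arr start (k + 1) := pvIt_subset_succ arr start k
  have hcmem : c ∈ pvIt arr start (k + 1) := pvMem_step.mpr (Or.inr ⟨v, hv, hc⟩)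
  have hsubF : (pvIt arr start k).toFinset ⊆ (pvIt arr start (k + 1)).toFinset := by
    intro x hx
    exact List.mem_toFinset.mpr (hsub (List.mem_toFinset.mp hx))
  have hss : (pvIt arr start k).toFinset ⊂ (pvIt arr start (k + 1)).toFinset :=
    (Finset.ssubset_iff_of_subset hsubF).mpr
      ⟨c, List.mem_toFinset.mpr hcmem, fun hc' => hcnot (List.mem_toFinset.mp hc')⟩
  have := Finset.card_lt_card hss
  rw [List.toFinset_card_of_nodup (pvIt_nodup arr start k),
      List.toFinset_card_of_nodup (pvIt_nodup arr start (k + 1))] at this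
  omega

theorem pvIt_chain (arr : List Int) (start : Int) (k : Nat) :
    pvClosed arr (pvIt arr start k) ∨ k + 1 ≤ (pvIt arr start k).length := by
  induction k with
  | zero =>
    right
    show 1 ≤ (PySem.Set.ofList [start]).length
    have h1 : PySem.Set.ofList [start] = [start] := rfl
    rw [h1]
    simp
  | succ m ih =>
    rcases ih with hcl | hlen
    · exact Or.inl (pvClosed_step hcl)
    · by_cases hc : pvClosed arr (pvIt arr start m)
      · exact Or.inl (pvClosed_step hc)
      · right
        have := pvIt_grow hc
        omega

theorem pvIt_closed (arr : List Int) (start : Int) :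
    pvClosed arr (pvIt arr start (2 * arr.length + 1)) := by
  rcases pvIt_chain arr start (2 * arr.length + 1) with h | h
  · exact h
  · exfalso
    have h1 := pvLen_le_of_subset_nodup (pvIt_nodup arr start (2 * arr.length + 1))
      (pvIt_subset_bigU arr start (2 * arr.length + 1))
    have h2 := pvBigU_len arr start
    omega

theorem pvIt_reach (arr : List Int) (start : Int) (k : Nat) :
    ∀ x ∈ pvIt arr start k, pvR arr start x := by
  induction k with
  | zero =>
    intro x hx
    have : x = start := by
      have := (PySem.Set.mem_ofList _ _).mp hx
      simpa using this
    subst this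
    exact pvR.refl _
  | succ m ih =>
    intro x hx
    rcases pvMem_step.mp hx with hx | ⟨v, hv, hx⟩
    · exact ih x hx
    · exact pvR.step (ih v hv) hx

theorem pvStart_mem_It (arr : List Int) (start : Int) (k : Nat) :
    start ∈ pvIt arr start k := by
  induction k with
  | zero => exact (PySem.Set.mem_ofList _ _).mpr (by simp)
  | succ m ih => exact pvIt_subset_succ arr start m start ih

theorem pvReach_mem_It (arr : List Int) (start : Int) {w : Int}
    (h : pvR arr start w) : w ∈ pvIt arr start (2 * arr.length + 1) := by
  induction h with
  | refl => exact pvStart_mem_It arr start _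
  | step _ hmem ih => exact pvIt_closed arr start _ ih _ hmem

-- ----- assembly -----

theorem pvLoopA_iff (arr : List Int) (start : Int) :
    pvLoopA (pvBuildGraph arr) (pvUniv (pvBuildGraph arr) arr.length start)
        PySem.Set.empty [start] = true
      ↔ ∃ w, pvR arr start w ∧ pvSucc arr w = [] := by
  constructor
  · intro h
    obtain ⟨w, ⟨q, hq, hR⟩, hw⟩ := pvLoopA_true arr _ _ _ h
    rcases List.mem_singleton.mp hq with rfl
    exact ⟨w, hR, hw⟩
  · intro ⟨w, hR, hw⟩
    by_contra hcon
    rw [Bool.not_eq_true] at hcon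
    have := pvLoopA_false arr _ (fun v c hc => pvMem_univ arr start hc)
      PySem.Set.empty [start]
      (by intro q hq; rcases List.mem_singleton.mp hq with rfl; exact List.mem_cons_self)
      (by intro u hu; cases hu)
      hcon start (Or.inr List.mem_cons_self) w hR
    exact this hw

theorem pvAny_iff (arr : List Int) (start : Int) :
    ((pvIt arr start (2 * arr.length + 1)).any
        (fun v => (pvSucc arr v).isEmpty) = true)
      ↔ ∃ w, pvR arr start w ∧ pvSucc arr w = [] := by
  rw [List.any_eq_true]
  constructor
  · intro ⟨v, hv, he⟩
    exact ⟨v, pvIt_reach arr start _ v hv, List.isEmpty_iff.mp he⟩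
  · intro ⟨w, hR, hw⟩
    exact ⟨w, pvReach_mem_It arr start hR, List.isEmpty_iff.mpr hw⟩

-- ===== VERDICT (by name: the statement is the Claim_ definition above) =====
theorem jump_to_zero_spec : Claim_equal_jump_to_zero := by
  intro arr start _
  show jump_to_zero arr start = jump_to_zero_alt arr start
  show pvLoopA (pvBuildGraph arr) (pvUniv (pvBuildGraph arr) arr.length start)
      PySem.Set.empty [start]
    = ((List.range (2 * arr.length + 1)).foldl (fun r _ => pvStep arr r)
        (PySem.Set.ofList [start])).any (fun v => (pvSucc arr v).isEmpty)
  rw [pvIt_eq_fold, Bool.eq_iff_iff, pvLoopA_iff, pvAny_iff]
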